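-- pv_equiv track=rewrite | github.com/DavidLMS/ipmentor | ipmentor/core.py | binary_to_ip
-- ===== SOURCE A (Python) =====
-- import ipaddress
--
-- def binary_to_ip(binary_str: str) -> str:
--     """Convert binary IP to decimal format."""
--     try:
--         binary_clean = binary_str.replace('.', '').replace(' ', '')
--         if len(binary_clean) != 32 or not all(c in '01' for c in binary_clean):
--             return "Invalid Binary"
--         ip_int = int(binary_clean, 2)
--         return str(ipaddress.IPv4Address(ip_int))
--     except:
--         return "Invalid Binary"
-- ===== SOURCE B (Python) =====
-- def binary_to_ip(binary_str: str) -> str: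
--     """Convert binary IP to decimal format."""
--     octets = []
--     val = 0
--     bits = 0
--     for c in binary_str:
--         if c == '.' or c == ' ':
--             continue
--         if c != '0' and c != '1':
--             return "Invalid Binary"
--         val = val * 2 + (1 if c == '1' else 0)
--         bits += 1
--         if bits == 8:
--             octets.append(str(val))
--             val = 0
--             bits = 0
--     if bits != 0 or len(octets) != 4:
--         return "Invalid Binary"
--     return '.'.join(octets)
-- ===== Notes on version B (the rewrite author's own statement) =====
-- stated objective: alternative
-- what changed: B makes a single pass over the raw string with a value/bit-count accumulator, skipping separators inline, emitting each decimal octet as its 8th bit arrives and joining at the end, instead of A's staged clean-then-validate-then-int(s,2)-then-ipaddress formatting; the ipaddress import is dropped.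
import Mathlib
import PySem

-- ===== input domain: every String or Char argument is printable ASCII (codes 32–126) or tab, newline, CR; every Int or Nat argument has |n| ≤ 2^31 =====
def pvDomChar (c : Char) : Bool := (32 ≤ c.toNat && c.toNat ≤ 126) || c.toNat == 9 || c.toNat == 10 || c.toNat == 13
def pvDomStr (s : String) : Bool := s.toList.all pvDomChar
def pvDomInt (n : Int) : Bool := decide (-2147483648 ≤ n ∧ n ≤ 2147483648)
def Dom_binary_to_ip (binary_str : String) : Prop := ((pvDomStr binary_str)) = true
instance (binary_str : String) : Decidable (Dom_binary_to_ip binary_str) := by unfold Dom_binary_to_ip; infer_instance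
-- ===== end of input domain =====

-- B is a single pass with a value/bit-count accumulator, emitting octets on the fly, instead of A's clean + int(s,2) + ipaddress formatting (alternative decomposition, drops the library dependency).


-- ===== PORT A =====
-- int(s, 2): exact for strings of '0'/'1' characters, the only strings it is applied to (after validation)
def pvBin (cs : List Char) : Int :=
  cs.foldl (fun a c => a * 2 + (if c = '1' then 1 else 0)) 0

-- binary_str.replace('.','').replace(' ',''), as a char list
def pvClean (binary_str : String) : List Char :=
  (PySem.Str.replace (PySem.Str.replace binary_str "." "") " " "").toList

-- str(ipaddress.IPv4Address(ip_int)): dotted-quad decimal rendering of the 32-bit value;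
-- exact for 0 ≤ n < 2^32, which validation guarantees, so the except branch is unreachable.
def binary_to_ip (binary_str : String) : String :=
  let cs := pvClean binary_str
  -- c in '01' for a single char c is exactly c == '0' || c == '1'
  if cs.length != 32 || !(cs.all fun c => c == '0' || c == '1') then "Invalid Binary"
  else
    let n := pvBin cs
    String.ofList (PySem.Int.toChars (PySem.Int.floordiv n 16777216) ++ '.' ::
               PySem.Int.toChars (PySem.Int.mod (PySem.Int.floordiv n 65536) 256) ++ '.' ::
               PySem.Int.toChars (PySem.Int.mod (PySem.Int.floordiv n 256) 256) ++ '.' ::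
               PySem.Int.toChars (PySem.Int.mod n 256))

-- ===== PORT B =====
-- the for-loop of Source B: state (val, bits, octets-reversed); separators skipped inline,
-- a non-bit character returns early, every 8th bit emits str(val); after the loop the
-- leftover-bit / octet-count check, then '.'.join(octets).
def pvGo : List Char → Int → Nat → List (List Char) → String
  | [], _, bits, octets =>
      if bits ≠ 0 ∨ octets.length ≠ 4 then "Invalid Binary"
      else String.ofList ((octets.reverse.intersperse ['.']).flatten)
  | c :: t, val, bits, octets =>
      if c = '.' ∨ c = ' ' then pvGo t val bits octets
      else if c ≠ '0' ∧ c ≠ '1' then "Invalid Binary"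
      else
        if bits + 1 = 8 then
          pvGo t 0 0 (PySem.Int.toChars (val * 2 + (if c = '1' then 1 else 0)) :: octets)
        else pvGo t (val * 2 + (if c = '1' then 1 else 0)) (bits + 1) octets

def binary_to_ip_alt (binary_str : String) : String :=
  pvGo binary_str.toList 0 0 []

-- ===== PRECONDITION & SPEC =====
def Spec_binary_to_ip (binary_str : String) (out : String) : Prop := out = binary_to_ip_alt binary_str
instance (binary_str : String) (out : String) : Decidable (Spec_binary_to_ip binary_str out) := by unfold Spec_binary_to_ip; infer_instance

-- ===== CLAIM (what is proved, stated in full; the proofs are below) =====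
def Claim_equal_binary_to_ip : Prop := ∀ (binary_str : String), Dom_binary_to_ip binary_str → Spec_binary_to_ip binary_str (binary_to_ip binary_str)

-- ===== LEMMAS AND PROOFS =====

theorem pvGo_cons (c : Char) (t : List Char) (val : Int) (bits : Nat) (octets : List (List Char)) :
    pvGo (c :: t) val bits octets =
      (if c = '.' ∨ c = ' ' then pvGo t val bits octets
       else if c ≠ '0' ∧ c ≠ '1' then "Invalid Binary"
       else
         if bits + 1 = 8 then
           pvGo t 0 0 (PySem.Int.toChars (val * 2 + (if c = '1' then 1 else 0)) :: octets)
         else pvGo t (val * 2 + (if c = '1' then 1 else 0)) (bits + 1) octets) := rfl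

-- replace(l, c, '') is filtering c out
theorem replace_go_filter (c : Char) (fuel : Nat) :
    ∀ (l acc : List Char), l.length ≤ fuel →
      PySem.Chars.replace.go [c] [] fuel l acc = acc.reverse ++ l.filter (· != c) := by
  induction fuel with
  | zero =>
    intro l acc h
    have : l = [] := List.eq_nil_of_length_eq_zero (Nat.le_zero.mp h)
    subst this
    simp [PySem.Chars.replace.go]
  | succ n ih =>
    intro l acc h
    cases l with
    | nil => simp [PySem.Chars.replace.go]
    | cons a t =>
      simp only [PySem.Chars.replace.go]
      by_cases hc : a = c
      · subst hc
        rw [if_pos (by simp [List.isPrefixOf])]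
        simp only [List.length_cons] at h
        rw [ih _ _ (by simpa using Nat.le_of_succ_le_succ h)]
        simp
      · rw [if_neg (by simp [List.isPrefixOf]; exact fun h' => hc h'.symm)]
        simp only [List.length_cons] at h
        rw [ih _ _ (Nat.le_of_succ_le_succ h)]
        simp [hc]

theorem replace_filter (l : List Char) (c : Char) :
    PySem.Chars.replace l [c] [] = l.filter (· != c) := by
  rw [PySem.Chars.replace]
  simp only [List.isEmpty_cons]
  rw [if_neg (by simp)]
  exact replace_go_filter c l.length l [] le_rfl

theorem pvClean_filter (s : String) :
    pvClean s = s.toList.filter (fun c => c != '.' && c != ' ') := by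
  unfold pvClean
  rw [show (PySem.Str.replace (PySem.Str.replace s "." "") " " "").toList
        = PySem.Chars.replace (PySem.Chars.replace s.toList ".".toList "".toList) " ".toList "".toList by
      simp [PySem.Str.toList_replace]]
  rw [show (".".toList : List Char) = ['.'] from rfl, show (" ".toList : List Char) = [' '] from rfl,
     show ("".toList : List Char) = [] from rfl]
  rw [replace_filter, replace_filter, List.filter_filter]
  exact List.filter_congr (fun a _ => by simp [Bool.and_comm])

-- pvGo ignores separators: running it on the raw list equals running it on the filtered list
theorem pvGo_filter (l : List Char) :
    ∀ val bits octets, pvGo l val bits octets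
      = pvGo (l.filter (fun c => c != '.' && c != ' ')) val bits octets := by
  induction l with
  | nil => intro _ _ _; rfl
  | cons a t ih =>
    intro val bits octets
    by_cases hs : a = '.' ∨ a = ' '
    · have hf : List.filter (fun c => c != '.' && c != ' ') (a :: t)
          = List.filter (fun c => c != '.' && c != ' ') t := by
        rcases hs with h | h <;> simp [h]
      rw [hf, pvGo_cons, if_pos hs]
      exact ih val bits octets
    · have hf : List.filter (fun c => c != '.' && c != ' ') (a :: t)
          = a :: List.filter (fun c => c != '.' && c != ' ') t := by
        push_neg at hs; simp [hs.1, hs.2]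
      rw [hf, pvGo_cons, pvGo_cons, if_neg hs, if_neg hs]
      split_ifs <;> first | rfl | exact ih _ _ _

-- a character that is neither a separator nor a bit makes pvGo fail
theorem pvGo_bad (l : List Char) :
    ∀ val bits octets, (∃ c ∈ l, ¬(c = '.' ∨ c = ' ') ∧ c ≠ '0' ∧ c ≠ '1') →
      pvGo l val bits octets = "Invalid Binary" := by
  induction l with
  | nil => intro _ _ _ h; simp at h
  | cons a t ih =>
    intro val bits octets ⟨c, hc, hns, h0, h1⟩
    rcases List.mem_cons.mp hc with rfl | hct
    · rw [pvGo_cons, if_neg hns, if_pos ⟨h0, h1⟩]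
    · rw [pvGo_cons]
      split_ifs <;> first | rfl | exact ih _ _ _ ⟨c, hct, hns, h0, h1⟩

-- an all-bit list whose length does not complete the 4 octets makes pvGo fail
theorem pvGo_len (l : List Char) :
    ∀ val bits octets, (∀ c ∈ l, c = '0' ∨ c = '1') →
      l.length + bits + 8 * octets.length ≠ 32 →
      pvGo l val bits octets = "Invalid Binary" := by
  induction l with
  | nil =>
    intro val bits octets _ hlen
    simp only [List.length_nil] at hlen
    simp only [pvGo]
    rw [if_pos (by omega)]
  | cons a t ih =>
    intro val bits octets h01 hlen
    have ha := h01 a List.mem_cons_self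
    have hns : ¬(a = '.' ∨ a = ' ') := by rcases ha with rfl | rfl <;> simp
    have hb : ¬(a ≠ '0' ∧ a ≠ '1') := by rcases ha with rfl | rfl <;> simp
    have h01' : ∀ c ∈ t, c = '0' ∨ c = '1' := fun c hc => h01 c (List.mem_cons_of_mem _ hc)
    simp only [List.length_cons] at hlen
    rw [pvGo_cons, if_neg hns, if_neg hb]
    by_cases h8 : bits + 1 = 8
    · rw [if_pos h8]
      exact ih _ _ _ h01' (by simp only [List.length_cons]; omega)
    · rw [if_neg h8]
      exact ih _ _ _ h01' (by omega)

-- consuming 8 bits from a fresh accumulator emits exactly that octet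
theorem pvGo_chunk (ys : List Char) :
    ∀ rest val bits octets, (∀ c ∈ ys, c = '0' ∨ c = '1') → bits + ys.length = 8 → ys ≠ [] →
      pvGo (ys ++ rest) val bits octets
        = pvGo rest 0 0
            (PySem.Int.toChars (ys.foldl (fun a c => a * 2 + (if c = '1' then 1 else 0)) val) :: octets) := by
  induction ys with
  | nil => intro _ _ _ _ _ _ hne; exact absurd rfl hne
  | cons a t ih =>
    intro rest val bits octets h01 hlen _
    have ha := h01 a List.mem_cons_self
    have hns : ¬(a = '.' ∨ a = ' ') := by rcases ha with rfl | rfl <;> simp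
    have hb : ¬(a ≠ '0' ∧ a ≠ '1') := by rcases ha with rfl | rfl <;> simp
    rw [List.cons_append, pvGo_cons, if_neg hns, if_neg hb]
    simp only [List.foldl_cons]
    cases t with
    | nil =>
      simp only [List.length_cons, List.length_nil] at hlen
      rw [if_pos (by omega)]
      simp
    | cons b u =>
      rw [if_neg (by simp only [List.length_cons] at hlen ⊢; omega)]
      exact ih rest _ _ octets (fun c hc => h01 c (List.mem_cons_of_mem _ hc))
        (by simp only [List.length_cons] at hlen ⊢; omega) (by simp)

theorem pvBin_foldl (cs : List Char) (a : Int) :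
    cs.foldl (fun a c => a * 2 + (if c = '1' then 1 else 0)) a
      = a * 2 ^ cs.length + pvBin cs := by
  induction cs generalizing a with
  | nil => simp [pvBin]
  | cons c t ih =>
    simp only [List.foldl_cons, List.length_cons, pvBin]
    rw [ih, ih (0 * 2 + _)]
    ring

theorem pvBin_append (xs ys : List Char) :
    pvBin (xs ++ ys) = pvBin xs * 2 ^ ys.length + pvBin ys := by
  unfold pvBin
  rw [List.foldl_append, pvBin_foldl]
  rfl

theorem pvBin_nonneg (cs : List Char) : 0 ≤ pvBin cs := by
  induction cs with
  | nil => simp [pvBin]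
  | cons c t ih =>
    have := pvBin_foldl t ((0:Int) * 2 + (if c = '1' then 1 else 0))
    simp only [pvBin, List.foldl_cons] at *
    rw [this]
    have : (0:Int) ≤ 2 ^ t.length := by positivity
    split_ifs <;> nlinarith

theorem pvBin_lt (cs : List Char) : pvBin cs < 2 ^ cs.length := by
  induction cs with
  | nil => simp [pvBin]
  | cons c t ih =>
    have h := pvBin_foldl t ((0:Int) * 2 + (if c = '1' then 1 else 0))
    simp only [pvBin, List.foldl_cons, List.length_cons] at *
    rw [h]
    have h2 : (0:Int) < 2 ^ t.length := by positivity
    rw [pow_succ]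
    split_ifs <;> nlinarith

-- decomposition of the full 32-bit value into the four octet values
theorem pvBin_split (cs : List Char) (h : cs.length = 32) :
    pvBin cs = pvBin (cs.take 8) * 16777216 + pvBin ((cs.drop 8).take 8) * 65536
      + pvBin ((cs.drop 16).take 8) * 256 + pvBin ((cs.drop 24).take 8) := by
  have l1 : (cs.drop 8).length = 24 := by simp [h]
  have s1 : pvBin cs = pvBin (cs.take 8) * 2 ^ 24 + pvBin (cs.drop 8) := by
    conv_lhs => rw [← List.take_append_drop 8 cs]
    rw [pvBin_append, l1]
  have s2 : pvBin (cs.drop 8) = pvBin ((cs.drop 8).take 8) * 2 ^ 16 + pvBin (cs.drop 16) := by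
    conv_lhs => rw [← List.take_append_drop 8 (cs.drop 8)]
    rw [pvBin_append]
    norm_num [List.drop_drop, h]
  have s3 : pvBin (cs.drop 16) = pvBin ((cs.drop 16).take 8) * 2 ^ 8 + pvBin (cs.drop 24) := by
    conv_lhs => rw [← List.take_append_drop 8 (cs.drop 16)]
    rw [pvBin_append]
    norm_num [List.drop_drop, h]
  have e4 : pvBin ((cs.drop 24).take 8) = pvBin (cs.drop 24) := by
    rw [List.take_of_length_le (by simp [h])]
  rw [s1, s2, s3, e4]
  ring

theorem octets_eq (cs : List Char) (h : cs.length = 32) :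
    PySem.Int.floordiv (pvBin cs) 16777216 = pvBin (cs.take 8) ∧
    PySem.Int.mod (PySem.Int.floordiv (pvBin cs) 65536) 256 = pvBin ((cs.drop 8).take 8) ∧
    PySem.Int.mod (PySem.Int.floordiv (pvBin cs) 256) 256 = pvBin ((cs.drop 16).take 8) ∧
    PySem.Int.mod (pvBin cs) 256 = pvBin ((cs.drop 24).take 8) := by
  have hs := pvBin_split cs h
  have ba1 := pvBin_lt (cs.take 8)
  have ba2 := pvBin_lt ((cs.drop 8).take 8)
  have ba3 := pvBin_lt ((cs.drop 16).take 8)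
  have ba4 := pvBin_lt ((cs.drop 24).take 8)
  rw [show (cs.take 8).length = 8 by simp [h]] at ba1
  rw [show ((cs.drop 8).take 8).length = 8 by simp [h]] at ba2
  rw [show ((cs.drop 16).take 8).length = 8 by simp [h]] at ba3
  rw [show ((cs.drop 24).take 8).length = 8 by simp [h]] at ba4
  have nn1 := pvBin_nonneg (cs.take 8)
  have nn2 := pvBin_nonneg ((cs.drop 8).take 8)
  have nn3 := pvBin_nonneg ((cs.drop 16).take 8)
  have nn4 := pvBin_nonneg ((cs.drop 24).take 8)
  norm_num at ba1 ba2 ba3 ba4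
  rw [PySem.Int.floordiv_eq_ediv_of_pos (by norm_num),
      PySem.Int.floordiv_eq_ediv_of_pos (by norm_num),
      PySem.Int.floordiv_eq_ediv_of_pos (by norm_num),
      PySem.Int.mod_eq_emod_of_pos (a := pvBin cs / 65536) (by norm_num),
      PySem.Int.mod_eq_emod_of_pos (a := pvBin cs / 256) (by norm_num),
      PySem.Int.mod_eq_emod_of_pos (a := pvBin cs) (by norm_num)]
  refine ⟨?_, ?_, ?_, ?_⟩ <;> omega

-- ===== VERDICT (by name: the statement is the Claim_ definition above) =====
set_option maxHeartbeats 2000000 in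
theorem binary_to_ip_eq (s : String) : binary_to_ip s = binary_to_ip_alt s := by
  have hB : binary_to_ip_alt s = pvGo (pvClean s) 0 0 [] := by
    rw [binary_to_ip_alt, pvGo_filter, pvClean_filter]
  simp only [binary_to_ip, hB]
  set cs := pvClean s with hcs
  have hns : ∀ c ∈ cs, ¬(c = '.' ∨ c = ' ') := by
    intro c hc
    rw [hcs, pvClean_filter] at hc
    have := (List.mem_filter.mp hc).2
    simp at this
    simp [this.1, this.2]
  by_cases hg : (cs.length != 32 || !(cs.all fun c => c == '0' || c == '1')) = true
  · rw [if_pos hg]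
    by_cases h01 : ∀ c ∈ cs, c = '0' ∨ c = '1'
    · have hlen : cs.length ≠ 32 := by
        simp only [Bool.or_eq_true, bne_iff_ne, Bool.not_eq_true', List.all_eq_false] at hg
        rcases hg with h | ⟨c, hc, hcc⟩
        · exact h
        · simp at hcc; exact absurd (h01 c hc) (by simp [hcc.1, hcc.2])
      exact (pvGo_len cs 0 0 [] h01 (by simpa using hlen)).symm
    · push_neg at h01
      obtain ⟨c, hc, hcc⟩ := h01
      exact (pvGo_bad cs 0 0 [] ⟨c, hc, hns c hc, hcc.1, hcc.2⟩).symm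
  · rw [if_neg hg]
    simp only [Bool.or_eq_true, bne_iff_ne, Bool.not_eq_true'] at hg
    push_neg at hg
    obtain ⟨hlen, hall⟩ := hg
    have h01 : ∀ c ∈ cs, c = '0' ∨ c = '1' := by
      intro c hc
      have hall2 : ∀ x ∈ cs, ¬x = '0' → x = '1' := by simpa using hall
      exact or_iff_not_imp_left.mpr (hall2 c hc)
    have hdec : cs = cs.take 8 ++ ((cs.drop 8).take 8 ++ ((cs.drop 16).take 8 ++ (cs.drop 24).take 8)) := by
      conv_lhs => rw [← List.take_of_length_le (le_of_eq hlen)]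
      rw [show (32:Nat) = 8 + 24 from rfl, List.take_add]
      rw [show (24:Nat) = 8 + 16 from rfl, List.take_add, List.drop_drop]
      rw [show (16:Nat) = 8 + 8 from rfl, List.take_add, List.drop_drop]
    have hsub1 : ∀ c ∈ cs.take 8, c = '0' ∨ c = '1' :=
      fun c hc => h01 c (List.take_subset _ _ hc)
    have hsub2 : ∀ k, ∀ c ∈ (cs.drop k).take 8, c = '0' ∨ c = '1' :=
      fun k c hc => h01 c (List.drop_subset _ _ ((List.take_subset _ _) hc))
    have hch : pvGo cs 0 0 [] =
        String.ofList (((([PySem.Int.toChars (pvBin ((cs.drop 24).take 8)),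
            PySem.Int.toChars (pvBin ((cs.drop 16).take 8)),
            PySem.Int.toChars (pvBin ((cs.drop 8).take 8)),
            PySem.Int.toChars (pvBin (cs.take 8))] : List (List Char)).reverse.intersperse ['.']).flatten)) := by
      conv_lhs => rw [hdec]
      rw [pvGo_chunk _ _ _ _ _ hsub1 (by simp [hlen]) (by apply List.ne_nil_of_length_pos; simp [hlen])]
      rw [pvGo_chunk _ _ _ _ _ (hsub2 8) (by simp [hlen]) (by apply List.ne_nil_of_length_pos; simp [hlen])]
      rw [pvGo_chunk _ _ _ _ _ (hsub2 16) (by simp [hlen]) (by apply List.ne_nil_of_length_pos; simp [hlen])]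
      rw [show (cs.drop 24).take 8 = (cs.drop 24).take 8 ++ [] from (List.append_nil _).symm]
      rw [pvGo_chunk _ _ _ _ _ (hsub2 24) (by simp [hlen]) (by apply List.ne_nil_of_length_pos; simp [hlen])]
      simp only [pvGo, List.length_cons, List.length_nil]
      rw [if_neg (by simp)]
      simp only [pvBin, List.append_nil]
    rw [hch]
    obtain ⟨e1, e2, e3, e4⟩ := octets_eq cs hlen
    rw [e1, e2, e3, e4]
    simp [List.intersperse]

theorem binary_to_ip_spec : Claim_equal_binary_to_ip :=
  fun s _ => binary_to_ip_eq s
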